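-- pv_equiv track=rewrite | github.com/ordovas/context-inject-arxiv | src/domain/output_cleaner.py | _strip_wrapper_quotes
-- ===== SOURCE A (Python) =====
-- def _strip_wrapper_quotes(text: str) -> str:
--     """
--     Strip outer quote characters only when the ENTIRE string is a quoted wrapper.
--
--     Correctly handles the Mistral pattern:
--         "cat:cs.LG OR cat:cs.AI"   →   cat:cs.LG OR cat:cs.AI
--
--     Leaves valid quoted phrases untouched:
--         all:"machine learning"     →   all:"machine learning"   (quotes are internal)
--     """
--     for quote_char in ('"', "'"):
--         if (
--             len(text) >= 2
--             and text.startswith(quote_char)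
--             and text.endswith(quote_char)
--         ):
--             inner = text[1:-1]
--             # Only strip if the quote character does not appear inside —
--             # that would indicate the quotes are structural, not a wrapper.
--             if quote_char not in inner:
--                 return inner.strip()
--     return text
-- ===== SOURCE B (Python) =====
-- def _strip_wrapper_quotes(text: str) -> str:
--     # Single left-to-right scanner: parse the grammar  QUOTE (non-QUOTE)* QUOTE <end>.
--     # Read the opening quote, advance over the run of non-quote characters; the
--     # string is a pure wrapper iff that run stops exactly at the final character.
--     if text and text[0] in '"\'':
--         q = text[0]
--         i = 1
--         while i < len(text) and text[i] != q:
--             i += 1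
--         if i == len(text) - 1:
--             return text[1:i].strip()
--     return text
-- ===== Notes on version B (the rewrite author's own statement) =====
-- stated objective: alternative
-- what changed: Replaces A's loop over the two candidate quote chars (startswith/endswith tests plus a separate membership scan of the inner slice) with a one-pass left-to-right scanner that parses the grammar QUOTE (non-QUOTE)* QUOTE end-of-string: it reads the opening quote, advances an index over the run of non-quote characters, and strips iff the run stops exactly at the last character.
import Mathlib
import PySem

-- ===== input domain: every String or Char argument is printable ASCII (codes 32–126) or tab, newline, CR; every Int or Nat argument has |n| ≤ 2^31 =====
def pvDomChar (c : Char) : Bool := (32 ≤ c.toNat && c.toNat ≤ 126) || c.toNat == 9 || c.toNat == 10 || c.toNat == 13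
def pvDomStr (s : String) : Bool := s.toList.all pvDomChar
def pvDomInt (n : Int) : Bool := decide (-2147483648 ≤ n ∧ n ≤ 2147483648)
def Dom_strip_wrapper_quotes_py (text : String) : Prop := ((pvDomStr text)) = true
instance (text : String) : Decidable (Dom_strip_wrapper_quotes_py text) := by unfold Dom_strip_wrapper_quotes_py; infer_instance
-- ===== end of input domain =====

-- B replaces A's loop over the two quote chars (startswith/endswith + inner-membership scan)
-- by a single left-to-right scanner parsing QUOTE (non-QUOTE)* QUOTE end (objective: alternative).


-- ===== PORT A =====
-- one iteration of A's `for quote_char in ('"', "'")` loop: `some r` = `return r`, `none` = fall through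
def pvTryStrip (text : String) (q : Char) : Option String :=
  if 2 ≤ PySem.Str.len text ∧
     PySem.Str.startswith text (String.ofList [q]) = true ∧
     PySem.Str.endswith text (String.ofList [q]) = true then
    let inner := PySem.Str.slice text (some 1) (some (-1))   -- text[1:-1]
    if PySem.Str.isIn (String.ofList [q]) inner = true then none
    else some (PySem.Str.strip inner)
  else none

def strip_wrapper_quotes_py (text : String) : String :=
  match pvTryStrip text '"' with
  | some r => r
  | none =>
    match pvTryStrip text '\'' with
    | some r => r
    | none => text

-- ===== PORT B =====
-- the `while i < len(text) and text[i] != q` loop of Source B, run on the tail of the string: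
-- returns i - 1, the number of characters advanced over (exact: structural recursion over the tail)
def pvScan (q : Char) : List Char → Nat
  | [] => 0
  | c :: t => if c = q then 0 else pvScan q t + 1

-- `text[0]` / `text and ...` become the head match; `i == len(text) - 1` is `1 + scan = tail.length`;
-- `text[1:i]` is the first i-1 = scan characters of the tail (exact since 1 ≤ i ≤ len(text))
def strip_wrapper_quotes_py_alt (text : String) : String :=
  match text.toList with
  | [] => text
  | c :: t =>
    if c = '"' ∨ c = '\'' then
      if 1 + pvScan c t = t.length then
        String.ofList (PySem.Chars.strip (List.take (pvScan c t) t))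
      else text
    else text

-- ===== PRECONDITION & SPEC =====
def Spec_strip_wrapper_quotes_py (text : String) (out : String) : Prop := out = strip_wrapper_quotes_py_alt text
instance (text : String) (out : String) : Decidable (Spec_strip_wrapper_quotes_py text out) := by unfold Spec_strip_wrapper_quotes_py; infer_instance

-- ===== CLAIM (what is proved, stated in full; the proofs are below) =====
def Claim_equal_strip_wrapper_quotes_py : Prop := ∀ (text : String), Dom_strip_wrapper_quotes_py text → Spec_strip_wrapper_quotes_py text (strip_wrapper_quotes_py text)

-- ===== LEMMAS AND PROOFS =====

theorem pref_single (q c : Char) (t : List Char) : [q] <+: (c :: t) ↔ c = q := by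
  constructor
  · rintro ⟨u, hu⟩; simp at hu; exact hu.1.symm
  · rintro rfl; exact ⟨t, rfl⟩

theorem suff_single (q c l : Char) (mid : List Char) : [q] <:+ (c :: (mid ++ [l])) ↔ l = q := by
  constructor
  · rintro ⟨t, ht⟩
    have h2 := congrArg List.getLast? ht
    rw [show c :: (mid ++ [l]) = (c :: mid) ++ [l] from rfl] at h2
    rw [List.getLast?_concat, List.getLast?_concat] at h2
    exact (Option.some_inj.mp h2.symm)
  · rintro rfl; exact ⟨c :: mid, rfl⟩

theorem slice_mid (c l : Char) (mid : List Char) :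
    PySem.List.slice (c :: (mid ++ [l])) (some 1) (some (-1)) = mid := by
  simp [pysem, PySem.List.slice, PySem.List.clampIdx]
  rw [if_neg (by omega)]
  simp

theorem tryStrip_spec (text : String) (q c l : Char) (mid : List Char)
    (h : text.toList = (c :: mid) ++ [l]) :
    pvTryStrip text q =
      if c = q ∧ l = q ∧ q ∉ mid then some (String.ofList (PySem.Chars.strip mid)) else none := by
  have hstrip : PySem.Str.strip (PySem.Str.slice text (some 1) (some (-1)))
      = String.ofList (PySem.Chars.strip mid) := by
    apply String.toList_inj.mp
    simp [pysem, h]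
    rw [slice_mid]
  unfold pvTryStrip
  simp only [pysem, h, String.toList_ofList, List.cons_append, pref_single, suff_single,
    slice_mid, List.singleton_infix_iff, hstrip]
  have hlen : (2:Int) ≤ ((c :: (mid ++ [l])).length : Int) := by simp; omega
  split_ifs <;> tauto

theorem tryStrip_short (text : String) (q : Char) (h : text.toList.length < 2) :
    pvTryStrip text q = none := by
  unfold pvTryStrip
  rw [if_neg]
  intro hc
  have h1 := hc.1
  rw [PySem.Str.len_eq] at h1
  omega

-- A's result characterized on a string of shape c :: mid ++ [l]
theorem a_spec (text : String) (c l : Char) (mid : List Char)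
    (h : text.toList = (c :: mid) ++ [l]) :
    strip_wrapper_quotes_py text =
      if (c = '"' ∨ c = '\'') ∧ l = c ∧ c ∉ mid
      then String.ofList (PySem.Chars.strip mid) else text := by
  unfold strip_wrapper_quotes_py
  rw [tryStrip_spec text '"' c l mid h, tryStrip_spec text '\'' c l mid h]
  split_ifs <;> simp_all
  rcases ‹(c = '"' ∨ c = '\'') ∧ _› with ⟨hq | hq, _, hm⟩ <;> subst hq <;> simp_all

theorem pvScan_notMem (q : Char) (mid : List Char) (l : Char) (h : q ∉ mid) :
    pvScan q (mid ++ [l]) = if l = q then mid.length else mid.length + 1 := by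
  induction mid with
  | nil => by_cases hl : l = q <;> simp [pvScan, hl]
  | cons a r ih =>
    simp only [List.mem_cons, not_or] at h
    have hne : ¬ a = q := fun hh => h.1 hh.symm
    simp only [List.cons_append, pvScan, if_neg hne, ih h.2, List.length_cons]
    by_cases hl : l = q <;> simp [hl]

theorem pvScan_mem_lt (q : Char) (s u : List Char) (h : q ∈ s) :
    pvScan q (s ++ u) < s.length := by
  induction s with
  | nil => simp at h
  | cons a r ih =>
    simp only [List.cons_append, pvScan, List.length_cons]
    by_cases ha : a = q
    · rw [if_pos ha]; omega
    · rw [if_neg ha]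
      rcases List.mem_cons.mp h with h1 | h2
      · exact absurd h1.symm ha
      · exact Nat.succ_lt_succ (ih h2)

-- the scanner's success condition on a string of shape c :: mid ++ [l]
theorem scan_cond (q l : Char) (mid : List Char) :
    (1 + pvScan q (mid ++ [l]) = (mid ++ [l]).length) ↔ (l = q ∧ q ∉ mid) := by
  have hlen : (mid ++ [l]).length = mid.length + 1 := by simp
  constructor
  · intro h
    by_cases hm : q ∈ mid
    · have hlt := pvScan_mem_lt q mid [l] hm
      exfalso; omega
    · refine ⟨?_, hm⟩
      rw [pvScan_notMem q mid l hm] at h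
      by_cases hl : l = q
      · exact hl
      · rw [if_neg hl] at h; omega
  · rintro ⟨hl, hm⟩
    rw [pvScan_notMem q mid l hm, if_pos hl]
    omega

-- B's result characterized on a string of shape c :: mid ++ [l]
theorem alt_spec (text : String) (c l : Char) (mid : List Char)
    (h : text.toList = (c :: mid) ++ [l]) :
    strip_wrapper_quotes_py_alt text =
      if (c = '"' ∨ c = '\'') ∧ l = c ∧ c ∉ mid
      then String.ofList (PySem.Chars.strip mid) else text := by
  have htake : l = c → c ∉ mid →
      List.take (pvScan c (mid ++ [l])) (mid ++ [l]) = mid := by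
    intro hl hm
    rw [pvScan_notMem c mid l hm, if_pos hl, List.take_left]
  simp only [strip_wrapper_quotes_py_alt, h, List.cons_append]
  by_cases hq : c = '"' ∨ c = '\''
  · rw [if_pos hq]
    by_cases hcond : l = c ∧ c ∉ mid
    · rw [if_pos ((scan_cond c l mid).mpr hcond), htake hcond.1 hcond.2,
        if_pos ⟨hq, hcond⟩]
    · rw [if_neg (fun hh => hcond ((scan_cond c l mid).mp hh)),
        if_neg (fun hh => hcond hh.2)]
  · rw [if_neg hq, if_neg (fun hh => hq hh.1)]

theorem ab_eq (text : String) : strip_wrapper_quotes_py text = strip_wrapper_quotes_py_alt text := by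
  by_cases hlen : 2 ≤ text.toList.length
  · obtain ⟨c, rest, hcr⟩ : ∃ c rest, text.toList = c :: rest := by
      cases hx : text.toList with
      | nil => rw [hx] at hlen; simp at hlen
      | cons a t => exact ⟨a, t, rfl⟩
    have hrest : rest ≠ [] := by
      intro h0; rw [h0] at hcr; rw [hcr] at hlen; simp at hlen
    obtain ⟨mid, l, hml⟩ : ∃ mid l, rest = mid ++ [l] :=
      ⟨rest.dropLast, rest.getLast hrest, (List.dropLast_append_getLast hrest).symm⟩
    have h : text.toList = (c :: mid) ++ [l] := by rw [hcr, hml]; rfl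
    rw [a_spec text c l mid h, alt_spec text c l mid h]
  · unfold strip_wrapper_quotes_py
    rw [tryStrip_short text '"' (by omega), tryStrip_short text '\'' (by omega)]
    cases hx : text.toList with
    | nil => simp only [strip_wrapper_quotes_py_alt, hx]
    | cons a t =>
      rw [hx] at hlen
      simp only [List.length_cons, not_le] at hlen
      have ht : t = [] := List.length_eq_zero_iff.mp (by omega)
      subst ht
      simp [strip_wrapper_quotes_py_alt, hx, pvScan]

-- ===== VERDICT (by name: the statement is the Claim_ definition above) =====
theorem strip_wrapper_quotes_py_spec : Claim_equal_strip_wrapper_quotes_py := by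
  intro text _
  unfold Spec_strip_wrapper_quotes_py
  exact ab_eq text
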